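-- pv_equiv track=rewrite | github.com/rt20bg/Anastasov_Theory | PrimeNumbers/alien_primes_simulator.py | get_alien_even_primes
-- ===== SOURCE A (Python) =====
-- def get_alien_even_primes(limit):
--     alien_numbers = list(range(2, limit + 1, 2))
--     alien_composites = set()
--
--     for a in alien_numbers:
--         for b in alien_numbers:
--             prod = a * b
--             if prod <= limit:
--                 alien_composites.add(prod)
--             else:
--                 break
--
--     alien_primes = [n for n in alien_numbers if n not in alien_composites]
--     # Calculate 1-based index for alien primes (e.g. 6 is the 3rd number)
--     alien_indices = [int(p/2) for p in alien_primes]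
--     return alien_primes, alien_indices
-- ===== SOURCE B (Python) =====
-- def get_alien_even_primes(limit):
--     # An even number is a product of two even numbers iff it is a multiple of 4,
--     # so the "alien primes" are exactly the numbers = 2 (mod 4) up to limit.
--     alien_primes = list(range(2, limit + 1, 4))
--     alien_indices = [p // 2 for p in alien_primes]
--     return alien_primes, alien_indices
-- ===== Notes on version B (the rewrite author's own statement) =====
-- stated objective: faster
-- what changed: Replaces the double loop that builds a set of products of two even numbers with a direct emission of the numbers congruent to 2 mod 4 via range(2, limit+1, 4), since an even number is a product of two even numbers exactly when it is a multiple of 4.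
import Mathlib
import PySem

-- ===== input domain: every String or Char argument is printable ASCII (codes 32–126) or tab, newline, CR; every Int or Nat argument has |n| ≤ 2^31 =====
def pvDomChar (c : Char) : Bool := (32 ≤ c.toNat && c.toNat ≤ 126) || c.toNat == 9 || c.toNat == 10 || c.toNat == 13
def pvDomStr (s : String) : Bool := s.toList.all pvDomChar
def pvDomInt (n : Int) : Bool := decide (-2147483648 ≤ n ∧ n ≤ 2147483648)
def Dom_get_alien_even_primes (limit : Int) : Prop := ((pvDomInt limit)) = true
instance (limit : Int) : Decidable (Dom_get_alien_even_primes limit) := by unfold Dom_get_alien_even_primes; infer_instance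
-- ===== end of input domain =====

-- B replaces A's quadratic product-set construction by directly emitting the numbers ≡ 2 (mod 4): faster (asymptotic).

-- ===== PORT A =====
-- inner 'for b in alien_numbers: prod = a*b; if prod <= limit: add else: break'
def pvInnerLoop (limit a : Int) : List Int → PySem.Set Int → PySem.Set Int
  | [], s => s
  | b :: bs, s =>
    if a * b ≤ limit then pvInnerLoop limit a bs (s.add (a * b)) else s

def get_alien_even_primes (limit : Int) : List Int × List Int :=
  let alien_numbers := PySem.List.pyRange 2 (limit + 1) 2
  let alien_composites := alien_numbers.foldl (fun s a => pvInnerLoop limit a alien_numbers s) PySem.Set.empty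
  let alien_primes := alien_numbers.filter (fun n => !(alien_composites.contains n))
  -- int(p/2): exact as trunc-division here (|p| ≤ limit < 2^53)
  let alien_indices := alien_primes.map (fun p => PySem.Int.truncdiv p 2)
  (alien_primes, alien_indices)

-- ===== PORT B =====
def get_alien_even_primes_alt (limit : Int) : List Int × List Int :=
  let alien_primes := PySem.List.pyRange 2 (limit + 1) 4
  let alien_indices := alien_primes.map (fun p => PySem.Int.floordiv p 2)
  (alien_primes, alien_indices)

-- ===== PRECONDITION & SPEC =====
def Spec_get_alien_even_primes (limit : Int) (out : List Int × List Int) : Prop := out = get_alien_even_primes_alt limit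
instance (limit : Int) (out : List Int × List Int) : Decidable (Spec_get_alien_even_primes limit out) := by unfold Spec_get_alien_even_primes; infer_instance

-- ===== CLAIM (what is proved, stated in full; the proofs are below) =====
def Claim_equal_get_alien_even_primes : Prop := ∀ (limit : Int), Dom_get_alien_even_primes limit → Spec_get_alien_even_primes limit (get_alien_even_primes limit)

-- ===== LEMMAS AND PROOFS =====

-- break characterization: on a sorted b-list with a > 0, the inner loop adds exactly the products ≤ limit
theorem pvInnerLoop_mem (limit a : Int) (ha : 0 < a) (bs : List Int)
    (hbs : bs.Pairwise (· ≤ ·)) (s : PySem.Set Int) (x : Int) :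
    x ∈ pvInnerLoop limit a bs s ↔ x ∈ s ∨ ∃ b ∈ bs, a * b ≤ limit ∧ x = a * b := by
  induction bs generalizing s with
  | nil => simp [pvInnerLoop]
  | cons b bs ih =>
    rw [List.pairwise_cons] at hbs
    simp only [pvInnerLoop]
    split_ifs with h
    · rw [ih hbs.2, PySem.Set.mem_add]
      constructor
      · rintro ((hx | hx) | ⟨b', hb', hle, rfl⟩)
        · exact Or.inl hx
        · exact Or.inr ⟨b, List.mem_cons_self, h, hx⟩
        · exact Or.inr ⟨b', List.mem_cons_of_mem _ hb', hle, rfl⟩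
      · rintro (hx | ⟨b', hb', hle, rfl⟩)
        · exact Or.inl (Or.inl hx)
        · rcases List.mem_cons.mp hb' with rfl | hb'
          · exact Or.inl (Or.inr rfl)
          · exact Or.inr ⟨b', hb', hle, rfl⟩
    · constructor
      · exact Or.inl
      · rintro (hx | ⟨b', hb', hle, rfl⟩)
        · exact hx
        · exfalso
          rcases List.mem_cons.mp hb' with rfl | hb'
          · exact h hle
          · have hbb : b ≤ b' := hbs.1 b' hb'
            have : a * b ≤ a * b' := by nlinarith
            exact h (le_trans this hle)

theorem pvPairwise_le_evens (limit : Int) :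
    (PySem.List.pyRange 2 (limit + 1) 2).Pairwise (· ≤ ·) := by
  rw [PySem.List.pyRange_of_pos 2 (limit + 1) (by norm_num)]
  exact (List.pairwise_lt_range).map _ (by intro i j hij; omega) |>.imp le_of_lt

theorem pvPairwise_lt_range4 (limit : Int) :
    (PySem.List.pyRange 2 (limit + 1) 4).Pairwise (· < ·) := by
  rw [PySem.List.pyRange_of_pos 2 (limit + 1) (by norm_num)]
  exact (List.pairwise_lt_range).map _ (by intro i j hij; omega)

-- the composite set holds exactly the products of two range elements that are ≤ limit
theorem pvComposites_mem (limit : Int) (x : Int) :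
    x ∈ (PySem.List.pyRange 2 (limit + 1) 2).foldl
          (fun s a => pvInnerLoop limit a (PySem.List.pyRange 2 (limit + 1) 2) s) PySem.Set.empty ↔
      ∃ a ∈ PySem.List.pyRange 2 (limit + 1) 2, ∃ b ∈ PySem.List.pyRange 2 (limit + 1) 2,
        a * b ≤ limit ∧ x = a * b := by
  have key : ∀ (as : List Int) (s : PySem.Set Int),
      (∀ a ∈ as, 0 < a) →
      (x ∈ as.foldl (fun s a => pvInnerLoop limit a (PySem.List.pyRange 2 (limit + 1) 2) s) s ↔
        x ∈ s ∨ ∃ a ∈ as, ∃ b ∈ PySem.List.pyRange 2 (limit + 1) 2, a * b ≤ limit ∧ x = a * b) := by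
    intro as
    induction as with
    | nil => simp
    | cons a as ih =>
      intro s hpos
      simp only [List.foldl_cons]
      rw [ih _ (fun a' ha' => hpos a' (List.mem_cons_of_mem _ ha')),
        pvInnerLoop_mem limit a (hpos a List.mem_cons_self) _ (pvPairwise_le_evens limit)]
      constructor
      · rintro ((hx | ⟨b, hb, hle, rfl⟩) | ⟨a', ha', hrest⟩)
        · exact Or.inl hx
        · exact Or.inr ⟨a, List.mem_cons_self, b, hb, hle, rfl⟩
        · exact Or.inr ⟨a', List.mem_cons_of_mem _ ha', hrest⟩
      · rintro (hx | ⟨a', ha', hrest⟩)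
        · exact Or.inl (Or.inl hx)
        · rcases List.mem_cons.mp ha' with rfl | ha'
          · exact Or.inl (Or.inr hrest)
          · exact Or.inr ⟨a', ha', hrest⟩
  rw [key _ PySem.Set.empty (fun a ha => by
    have := (PySem.List.mem_pyRange_iff_of_pos (by norm_num : (0:Int) < 2) a).mp ha
    omega)]
  simp [PySem.Set.empty]

-- membership in the composite set, for an element of the even range, is divisibility by 4
theorem pvComposite_iff (limit : Int) (x : Int)
    (hx : x ∈ PySem.List.pyRange 2 (limit + 1) 2) :
    (∃ a ∈ PySem.List.pyRange 2 (limit + 1) 2, ∃ b ∈ PySem.List.pyRange 2 (limit + 1) 2,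
        a * b ≤ limit ∧ x = a * b) ↔ (4 : Int) ∣ x := by
  rw [PySem.List.mem_pyRange_iff_of_pos (by norm_num : (0:Int) < 2)] at hx
  constructor
  · rintro ⟨a, ha, b, hb, hle, rfl⟩
    rw [PySem.List.mem_pyRange_iff_of_pos (by norm_num : (0:Int) < 2)] at ha hb
    obtain ⟨k, hk⟩ := ha.2.2
    obtain ⟨m, hm⟩ := hb.2.2
    exact ⟨(k + 1) * (m + 1), by nlinarith⟩
  · rintro ⟨m, rfl⟩
    refine ⟨2, ?_, 2 * m, ?_, by omega, by ring⟩
    · rw [PySem.List.mem_pyRange_iff_of_pos (by norm_num : (0:Int) < 2)]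
      omega
    · rw [PySem.List.mem_pyRange_iff_of_pos (by norm_num : (0:Int) < 2)]
      refine ⟨by omega, by omega, ⟨m - 1, by omega⟩⟩

theorem pvPairwise_lt_evens (limit : Int) :
    (PySem.List.pyRange 2 (limit + 1) 2).Pairwise (· < ·) := by
  rw [PySem.List.pyRange_of_pos 2 (limit + 1) (by norm_num)]
  exact (List.pairwise_lt_range).map _ (by intro i j hij; omega)

theorem pvFilter_eq (limit : Int) :
    (PySem.List.pyRange 2 (limit + 1) 2).filter
        (fun n => !((PySem.List.pyRange 2 (limit + 1) 2).foldl
          (fun s a => pvInnerLoop limit a (PySem.List.pyRange 2 (limit + 1) 2) s) PySem.Set.empty).contains n)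
      = PySem.List.pyRange 2 (limit + 1) 4 := by
  have h4 := pvPairwise_lt_range4 limit
  have hfil : ((PySem.List.pyRange 2 (limit + 1) 2).filter
      (fun n => !((PySem.List.pyRange 2 (limit + 1) 2).foldl
        (fun s a => pvInnerLoop limit a (PySem.List.pyRange 2 (limit + 1) 2) s) PySem.Set.empty).contains n)).Pairwise (· < ·) :=
    List.Pairwise.sublist List.filter_sublist (pvPairwise_lt_evens limit)
  have hmem : ∀ x : Int,
      x ∈ (PySem.List.pyRange 2 (limit + 1) 2).filter
        (fun n => !((PySem.List.pyRange 2 (limit + 1) 2).foldl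
          (fun s a => pvInnerLoop limit a (PySem.List.pyRange 2 (limit + 1) 2) s) PySem.Set.empty).contains n) ↔
      x ∈ PySem.List.pyRange 2 (limit + 1) 4 := by
    intro x
    rw [List.mem_filter]
    constructor
    · rintro ⟨hx, hc⟩
      have hnotin : x ∉ (PySem.List.pyRange 2 (limit + 1) 2).foldl
          (fun s a => pvInnerLoop limit a (PySem.List.pyRange 2 (limit + 1) 2) s) PySem.Set.empty := by
        intro hin
        have hct := (PySem.Set.contains_iff _ x).mpr hin
        rw [hct] at hc
        exact absurd hc (by decide)
      rw [pvComposites_mem, pvComposite_iff limit x hx] at hnotin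
      rw [PySem.List.mem_pyRange_iff_of_pos (by norm_num : (0:Int) < 2)] at hx
      rw [PySem.List.mem_pyRange_iff_of_pos (by norm_num : (0:Int) < 4)]
      refine ⟨hx.1, hx.2.1, ?_⟩
      obtain ⟨k, hk⟩ := hx.2.2
      rcases Int.even_or_odd k with ⟨m, hm⟩ | ⟨m, hm⟩
      · exact ⟨m, by omega⟩
      · exact absurd ⟨m + 1, by omega⟩ hnotin
    · intro hx
      rw [PySem.List.mem_pyRange_iff_of_pos (by norm_num : (0:Int) < 4)] at hx
      obtain ⟨m, hm⟩ := hx.2.2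
      have hx2 : x ∈ PySem.List.pyRange 2 (limit + 1) 2 := by
        rw [PySem.List.mem_pyRange_iff_of_pos (by norm_num : (0:Int) < 2)]
        exact ⟨hx.1, hx.2.1, ⟨2 * m, by omega⟩⟩
      refine ⟨hx2, ?_⟩
      have hnotin : x ∉ (PySem.List.pyRange 2 (limit + 1) 2).foldl
          (fun s a => pvInnerLoop limit a (PySem.List.pyRange 2 (limit + 1) 2) s) PySem.Set.empty := by
        rw [pvComposites_mem, pvComposite_iff limit x hx2]
        rintro ⟨j, hj⟩
        omega
      simp only [Bool.not_eq_true', Bool.eq_false_iff]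
      intro h
      exact hnotin ((PySem.Set.contains_iff _ x).mp h)
  have hperm : ((PySem.List.pyRange 2 (limit + 1) 2).filter
      (fun n => !((PySem.List.pyRange 2 (limit + 1) 2).foldl
        (fun s a => pvInnerLoop limit a (PySem.List.pyRange 2 (limit + 1) 2) s) PySem.Set.empty).contains n)).Perm
      (PySem.List.pyRange 2 (limit + 1) 4) := by
    rw [List.perm_ext_iff_of_nodup (hfil.imp ne_of_lt) (h4.imp ne_of_lt)]
    exact hmem
  exact List.Perm.eq_of_pairwise (fun a b _ _ h1 h2 => le_antisymm h1 h2)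
    (hfil.imp le_of_lt) (h4.imp le_of_lt) hperm

-- ===== VERDICT (by name: the statement is the Claim_ definition above) =====
theorem get_alien_even_primes_spec : Claim_equal_get_alien_even_primes := by
  intro limit _
  unfold Spec_get_alien_even_primes get_alien_even_primes get_alien_even_primes_alt
  simp only []
  rw [pvFilter_eq limit]
  refine Prod.ext rfl ?_
  refine List.map_congr_left ?_
  intro p hp
  rw [PySem.List.mem_pyRange_iff_of_pos (by norm_num : (0:Int) < 4)] at hp
  rw [PySem.Int.floordiv_eq_ediv_of_pos (by norm_num)]
  simp [PySem.Int.truncdiv]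
  rw [Int.tdiv_eq_ediv_of_nonneg (by omega)]
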